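-- pv_equiv track=rewrite | github.com/jeekim2/algostudy_ind | Problems/6603/ans_6603.py | selNum
-- ===== SOURCE A (Python) =====
-- def selNum(sets, nums):
--     res = []
--     if len(sets) == nums:
--         res.append(sets)
--         return res
--     if nums == 1:
--         for s in sets:
--             res.append([s])
--         return res
--     for i, v in enumerate(sets):
--         if len(sets) - i == nums - 1:
--             break
--         temp_res = selNum(sets[i + 1 :], nums - 1)
--         for t in temp_res:
--             res.append([v] + t)
--     return res
-- ===== SOURCE B (Python) =====
-- def selNum(sets, nums):
--     # Classic include/exclude structural recursion on the head of the list.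
--     def comb(xs, k):
--         if k == 0:
--             return [[]]
--         if not xs:
--             return []
--         rest = comb(xs[1:], k - 1)
--         return [[xs[0]] + t for t in rest] + comb(xs[1:], k)
--     return comb(sets, nums)
-- ===== Notes on version B (the rewrite author's own statement) =====
-- stated objective: alternative
-- what changed: Replaces A's position-loop recursion (enumerate positions, early-break guard, suffix slices, special cases for nums==len and nums==1) by the classic include/exclude structural recursion on the head of the list.
-- intended difference: For nums == 0 with nonempty sets, A returns [] while B returns [[]], the one way to choose zero elements (as itertools.combinations gives), which is the intended value. — e.g. on selNum([1], 0): A returns [], B returns [[]]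
import Mathlib
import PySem

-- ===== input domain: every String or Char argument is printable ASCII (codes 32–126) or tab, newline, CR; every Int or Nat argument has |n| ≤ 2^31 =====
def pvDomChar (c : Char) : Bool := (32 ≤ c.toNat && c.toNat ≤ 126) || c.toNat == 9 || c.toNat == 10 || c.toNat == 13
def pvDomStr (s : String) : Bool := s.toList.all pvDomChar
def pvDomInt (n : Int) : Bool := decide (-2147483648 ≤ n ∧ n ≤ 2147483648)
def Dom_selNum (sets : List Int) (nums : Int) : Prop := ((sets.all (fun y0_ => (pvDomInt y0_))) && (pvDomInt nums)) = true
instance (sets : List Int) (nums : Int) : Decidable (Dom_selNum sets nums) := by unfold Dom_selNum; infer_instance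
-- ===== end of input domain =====

-- B replaces A's position-loop recursion by the classic include/exclude structural recursion
-- (alternative decomposition, same cost); for nums == 0 with nonempty sets A returns [] while B
-- returns [[]] (the intended value), stated as D_selNum below.


-- ===== PORT A =====
-- literal port of A: the `for i, v in enumerate(sets)` loop with its `break` becomes the
-- index recursion selNumGo carrying the accumulator `res`; `sets[i+1:]` (nonnegative start)
-- is exactly List.drop (i+1).
mutual
def selNum (sets : List Int) (nums : Int) : List (List Int) :=
  if (sets.length : Int) = nums then [sets]
  else if nums = 1 then sets.map (fun s => [s])
  else selNumGo sets nums 0 []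
termination_by (sets.length, sets.length + 1)

def selNumGo (sets : List Int) (nums : Int) (i : Nat) (res : List (List Int)) : List (List Int) :=
  if h : i < sets.length then
    if (sets.length : Int) - (i : Int) = nums - 1 then res
    else
      selNumGo sets nums (i + 1)
        (res ++ (selNum (sets.drop (i + 1)) (nums - 1)).map (fun t => sets[i] :: t))
  else res
termination_by (sets.length, sets.length - i)
decreasing_by
  · exact Prod.Lex.left _ _ (by simp [List.length_drop]; omega)
  · exact Prod.Lex.right _ (by omega)
end

-- ===== PORT B =====
def combAlt (xs : List Int) (k : Int) : List (List Int) :=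
  if k = 0 then [[]]
  else
    match xs with
    | [] => []
    | x :: t => (combAlt t (k - 1)).map (fun l => x :: l) ++ combAlt t k
termination_by structural xs

def selNum_alt (sets : List Int) (nums : Int) : List (List Int) := combAlt sets nums

-- ===== PRECONDITION & SPEC =====
-- For nums == 0 with nonempty sets, A returns [] while B returns [[]], the one way to choose
-- zero elements (as itertools.combinations gives), which is the intended value.
def D_selNum (sets : List Int) (nums : Int) : Prop := nums = 0 ∧ sets ≠ []
instance (sets : List Int) (nums : Int) : Decidable (D_selNum sets nums) := by unfold D_selNum; infer_instance

def Spec_selNum (sets : List Int) (nums : Int) (out : List (List Int)) : Prop :=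
  ¬ D_selNum sets nums → out = selNum_alt sets nums
instance (sets : List Int) (nums : Int) (out : List (List Int)) : Decidable (Spec_selNum sets nums out) := by unfold Spec_selNum; infer_instance

def pvDiffWitness_selNum : List Int × Int := ([1], 0)
def pvDiffWitnessOut_selNum : (List (List Int)) × (List (List Int)) := ([], [[]])

-- ===== CLAIM (what is proved, stated in full; the proofs are below) =====
def Claim_unchanged_selNum : Prop := ∀ (sets : List Int) (nums : Int), Dom_selNum sets nums → Spec_selNum sets nums (selNum sets nums)
def Claim_changed_selNum : Prop := Dom_selNum (pvDiffWitness_selNum.1) (pvDiffWitness_selNum.2) ∧ D_selNum (pvDiffWitness_selNum.1) (pvDiffWitness_selNum.2) ∧ selNum (pvDiffWitness_selNum.1) (pvDiffWitness_selNum.2) = pvDiffWitnessOut_selNum.1 ∧ selNum_alt (pvDiffWitness_selNum.1) (pvDiffWitness_selNum.2) = pvDiffWitnessOut_selNum.2 ∧ pvDiffWitnessOut_selNum.1 ≠ pvDiffWitnessOut_selNum.2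
def Claim_exact_selNum : Prop := ∀ (sets : List Int) (nums : Int), Dom_selNum sets nums → D_selNum sets nums → selNum sets nums ≠ selNum_alt sets nums

-- ===== LEMMAS AND PROOFS =====

theorem combAlt_neg (xs : List Int) (k : Int) (hk : k < 0) : combAlt xs k = [] := by
  induction xs generalizing k with
  | nil => rw [combAlt.eq_def]; simp [show k ≠ 0 by omega]
  | cons x t ih =>
    rw [combAlt.eq_def]
    simp [show k ≠ 0 by omega, ih (k - 1) (by omega), ih k hk]

theorem combAlt_big (xs : List Int) (k : Int) (hk : (xs.length : Int) < k) : combAlt xs k = [] := by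
  induction xs generalizing k with
  | nil => rw [combAlt.eq_def]; simp at hk ⊢; omega
  | cons x t ih =>
    rw [combAlt.eq_def]
    simp at hk
    simp [show k ≠ 0 by omega, ih (k - 1) (by omega), ih k (by omega)]

theorem combAlt_self (xs : List Int) : combAlt xs (xs.length : Int) = [xs] := by
  induction xs with
  | nil => rw [combAlt.eq_def]; simp
  | cons x t ih =>
    rw [combAlt.eq_def]
    simp only [List.length_cons]
    have h1 : ((t.length + 1 : Nat) : Int) - 1 = (t.length : Int) := by push_cast; omega
    rw [if_neg (by push_cast; omega), h1, ih, combAlt_big t _ (by push_cast; omega)]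
    simp

theorem combAlt_one (xs : List Int) : combAlt xs 1 = xs.map (fun s => [s]) := by
  induction xs with
  | nil => rw [combAlt.eq_def]; simp
  | cons x t ih =>
    have h0 : combAlt t 0 = [[]] := by rw [combAlt.eq_def]; simp
    rw [combAlt.eq_def]
    simp only [if_neg (by norm_num : (1:Int) ≠ 0), sub_self]
    simp [h0, ih]

-- the loop invariant: once `nums ≥ 2` and the recursive calls are known to agree with combAlt,
-- selNumGo appends exactly the combinations of the remaining suffix.
theorem go_spec (sets : List Int) (nums : Int) (h2 : 2 ≤ nums)
    (hrec : ∀ ys : List Int, ys.length < sets.length → selNum ys (nums - 1) = combAlt ys (nums - 1)) :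
    ∀ (n i : Nat) (res : List (List Int)), sets.length - i ≤ n →
      selNumGo sets nums i res = res ++ combAlt (sets.drop i) nums := by
  intro n
  induction n with
  | zero =>
    intro i res hle
    rw [selNumGo]
    have hge : sets.length ≤ i := by omega
    rw [dif_neg (by omega), List.drop_eq_nil_of_le hge, combAlt]
    simp [show nums ≠ 0 by omega]
  | succ n ih =>
    intro i res hle
    rw [selNumGo]
    by_cases h : i < sets.length
    · rw [dif_pos h]
      by_cases hb : (sets.length : Int) - (i : Int) = nums - 1
      · rw [if_pos hb]
        have : combAlt (sets.drop i) nums = [] := by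
          apply combAlt_big
          simp [List.length_drop]
          omega
        simp [this]
      · rw [if_neg hb]
        rw [ih (i + 1) _ (by omega)]
        have hd : sets.drop i = sets[i] :: sets.drop (i + 1) := List.drop_eq_getElem_cons h
        have hlt : (sets.drop (i + 1)).length < sets.length := by simp [List.length_drop]; omega
        rw [hrec _ hlt, hd, combAlt]
        simp [show nums ≠ 0 by omega]
    · rw [dif_neg h]
      rw [List.drop_eq_nil_of_le (by omega), combAlt]
      simp [show nums ≠ 0 by omega]

theorem selNum_eq_combAlt_pos :
    ∀ (n : Nat) (sets : List Int), sets.length ≤ n → ∀ nums : Int, 1 ≤ nums →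
      selNum sets nums = combAlt sets nums := by
  intro n
  induction n with
  | zero =>
    intro sets hlen nums h1
    have : sets = [] := List.eq_nil_of_length_eq_zero (by omega)
    subst this
    rw [selNum]
    by_cases h : (0 : Int) = nums
    · simp only [List.length_nil, Int.natCast_zero, if_pos h]
      rw [← h, combAlt]; simp
    · rw [if_neg (by simpa using h)]
      by_cases h1' : nums = 1
      · subst h1'; rw [combAlt_one]; simp
      · rw [if_neg h1', selNumGo, combAlt]
        simp [show nums ≠ 0 by omega]
  | succ n ih =>
    intro sets hlen nums h1
    rw [selNum]
    by_cases hs : (sets.length : Int) = nums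
    · rw [if_pos hs, ← hs, combAlt_self]
    · rw [if_neg hs]
      by_cases h1' : nums = 1
      · subst h1'; rw [if_pos rfl, combAlt_one]
      · rw [if_neg h1']
        have h2 : 2 ≤ nums := by omega
        have hrec : ∀ ys : List Int, ys.length < sets.length →
            selNum ys (nums - 1) = combAlt ys (nums - 1) := by
          intro ys hy
          exact ih ys (by omega) (nums - 1) (by omega)
        rw [go_spec sets nums h2 hrec sets.length 0 [] (by omega)]
        simp

-- when nums ≤ 0 the loop contributes nothing: every recursive call has a negative count.
theorem go_id (sets : List Int) (nums : Int) (hn : nums ≤ 0)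
    (hrec : ∀ ys : List Int, ys.length < sets.length → selNum ys (nums - 1) = []) :
    ∀ (n i : Nat) (res : List (List Int)), sets.length - i ≤ n → selNumGo sets nums i res = res := by
  intro n
  induction n with
  | zero =>
    intro i res hle
    rw [selNumGo, dif_neg (by omega)]
  | succ n ih =>
    intro i res hle
    rw [selNumGo]
    by_cases h : i < sets.length
    · rw [dif_pos h, if_neg (by omega)]
      have hlt : (sets.drop (i + 1)).length < sets.length := by simp [List.length_drop]; omega
      rw [hrec _ hlt]
      simpa using ih (i + 1) res (by omega)
    · rw [dif_neg h]

theorem selNum_nonpos :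
    ∀ (n : Nat) (sets : List Int), sets.length ≤ n → ∀ nums : Int, nums ≤ 0 →
      (nums = 0 → sets ≠ []) → selNum sets nums = [] := by
  intro n
  induction n with
  | zero =>
    intro sets hlen nums hn h0
    have hnil : sets = [] := List.eq_nil_of_length_eq_zero (by omega)
    have hneg : nums < 0 := by
      rcases lt_or_eq_of_le hn with h | h
      · exact h
      · subst h; exact absurd hnil (h0 rfl)
    subst hnil
    rw [selNum, if_neg (by simpa using (by omega : (0:Int) ≠ nums)), if_neg (by omega), selNumGo]
    simp
  | succ n ih =>
    intro sets hlen nums hn h0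
    rw [selNum]
    rw [if_neg (by
      intro h
      have : sets.length = 0 := by omega
      exact h0 (by omega) (List.eq_nil_of_length_eq_zero this))]
    rw [if_neg (by omega)]
    exact go_id sets nums hn
      (fun ys hy => ih ys (by omega) (nums - 1) (by omega) (by omega)) sets.length 0 [] (by omega)

theorem selNum_zero_nonempty (sets : List Int) (h : sets ≠ []) : selNum sets 0 = [] :=
  selNum_nonpos sets.length sets le_rfl 0 le_rfl (fun _ => h)

-- ===== VERDICT (by name: the statement is the Claim_ definition above) =====
theorem selNum_spec : Claim_unchanged_selNum := by
  intro sets nums _ hD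
  unfold D_selNum at hD
  unfold selNum_alt
  by_cases h1 : 1 ≤ nums
  · exact selNum_eq_combAlt_pos sets.length sets le_rfl nums h1
  · by_cases h0 : nums = 0
    · subst h0
      have hnil : sets = [] := by
        by_contra hne
        exact hD ⟨rfl, hne⟩
      subst hnil
      rw [selNum, if_pos (by simp), combAlt]
      simp
    · rw [selNum_nonpos sets.length sets le_rfl nums (by omega) (fun h => absurd h h0),
        combAlt_neg sets nums (by omega)]

theorem selNum_changed : Claim_changed_selNum := by
  unfold Claim_changed_selNum
  refine ⟨by decide, ⟨rfl, by decide⟩, ?_, ?_, by decide⟩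
  · exact selNum_zero_nonempty [1] (by simp)
  · show combAlt [1] 0 = [[]]
    rw [combAlt.eq_def]; simp

theorem selNum_tight : Claim_exact_selNum := by
  intro sets nums _ hD
  obtain ⟨h0, hne⟩ := hD
  subst h0
  rw [selNum_zero_nonempty sets hne]
  show ([] : List (List Int)) ≠ combAlt sets 0
  rw [combAlt.eq_def]
  simp
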